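/- GENERATED by farm/mkstatement.py from design/units.tsv (unit `start_decoder.C7`) and the assertions of Vorbis/Spec/StartDecoderA.lean — do not edit.
   THE STATEMENT of the proof unit `start_decoder.C7`: segment C7 of `start_decoder` (23 instructions; entries 0x1146d2;
   exits 0x113b22,0x1146f5; ranges 0x1146d2-0x1146ef + 0x1149ba-0x1149f1)
   takes each of its entry assertions to one of its exit assertions (`Vorbis.Spec.StartDecoder.SegC7`), given the contracts of its callees.
   What the names mean: Vorbis/Spec/Basic.lean (the shared hypotheses), Vorbis/Spec/StartDecoderA.lean (the assertions). The theorem to prove: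
   `theorem start_decoder_C7_ok : Vorbis.Spec.start_decoder_C7.Statement`. -/
import Vorbis.Spec.Alloc
import Vorbis.Spec.Codebook
import Vorbis.Spec.Leaves
import Vorbis.Spec.StartDecoderA
namespace Vorbis.Spec.start_decoder_C7
open X86 X86.User Asan

/-- The statement of unit `start_decoder.C7`. -/
def Statement : Prop :=
  ∀ (Lay : Layout) (_hLay : Lay.hi = 0x1000000) (μ : Microarch) (_hμ : UserX.MicroOK μ) (u₀ : State)
    (_hcode : HasCodeNat Lay u₀ Vorbis.L.start_decoder.entry Vorbis.Code.code_start_decoder.nat Vorbis.L.start_decoder.size)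
    (_h_asan_load4_noabort : Asan.SmallCheck Lay μ Vorbis.WayInv (Vorbis.CodeOK u₀) [.rax, .rcx, .rdx] 4 Vorbis.L.__asan_load4_noabort.entry)
    (_h_compute_codewords : ∀ (others : List Obj) (frames : List (Nat × FrameLayout)) (Blk : Block → Prop), Calls Lay μ Vorbis.WayInv (Vorbis.conv u₀) Vorbis.L.compute_codewords.entry (Vorbis.Spec.compute_codewords.spec others frames Blk))
    (_h_asan_load1_noabort : Asan.SmallCheck Lay μ Vorbis.WayInv (Vorbis.CodeOK u₀) [.rax, .rdx] 1 Vorbis.L.__asan_load1_noabort.entry)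
    (_h_error : ∀ (others : List Obj) (frames : List (Nat × FrameLayout)), Calls Lay μ Vorbis.WayInv (Vorbis.conv u₀) Vorbis.L.error.entry (Vorbis.Spec.error.spec others frames))
    (_h_setup_temp_free : ∀ (others : List Obj) (frames : List (Nat × FrameLayout)), Calls Lay μ Vorbis.WayInv (Vorbis.conv u₀) Vorbis.L.setup_temp_free.entry (Vorbis.Spec.setup_temp_free.weakSpec others frames)),
    Vorbis.Spec.StartDecoder.SegC7 Lay μ u₀

end Vorbis.Spec.start_decoder_C7
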